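-- pv_equiv track=rewrite | github.com/paramashivatma/autodubber | dubber/segment_merger.py | _is_complete_thought
-- ===== SOURCE A (Python) =====
-- INCOMPLETE_ENDINGS = (
--     ",",
--     ":",
--     ";",
--     "-",
--     " and",
--     " or",
--     " but",
--     " so",
--     " because",
--     " that",
--     " which",
--     " who",
--     " where",
--     " when",
--     " while",
--     " if",
--     " then",
--     " than",
--     " the",
--     " a",
--     " an",
--     " to",
--     " of",
--     " in",
--     " on",
--     " for",
--     " with",
--     " from",
--     " by",
--     " is",
--     " are",
--     " was",
--     " were",
--     " be",
--     " it",
--     " there",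
--     " this",
-- )
--
-- def _is_complete_thought(text):
--     cleaned = (text or "").strip()
--     if not cleaned:
--         return False
--     lower = cleaned.lower().rstrip()
--     if lower.endswith(("...", ",")):
--         return False
--     if cleaned.endswith((".", "!", "?")):
--         return True
--     return not any(lower.endswith(token) for token in INCOMPLETE_ENDINGS)
-- ===== SOURCE B (Python) =====
-- INCOMPLETE_WORDS = frozenset({
--     "and", "or", "but", "so", "because", "that", "which", "who", "where",
--     "when", "while", "if", "then", "than", "the", "a", "an", "to", "of",
--     "in", "on", "for", "with", "from", "by", "is", "are", "was", "were",
--     "be", "it", "there", "this",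
-- })
--
-- def _is_complete_thought(text):
--     cleaned = (text or "").strip()
--     if not cleaned:
--         return False
--     lower = cleaned.lower().rstrip()
--     last = lower[-1]
--     if last == '.':
--         return not lower.endswith('...')
--     if last in '!?':
--         return True
--     if last in ',:;-':
--         return False
--     word = []
--     for ch in reversed(lower):
--         if ch == ' ':
--             return ''.join(reversed(word)) not in INCOMPLETE_WORDS
--         word.append(ch)
--     return True
-- ===== Notes on version B (the rewrite author's own statement) =====
-- stated objective: alternative
-- what changed: Replaces A's scan of 37 suffix tokens by a dispatch on the final character (ellipsis test only in the '.' branch, table of terminal punctuation) followed by one backward scan that collects the last word and looks it up in a set, instead of re-scanning every suffix.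
import Mathlib
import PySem

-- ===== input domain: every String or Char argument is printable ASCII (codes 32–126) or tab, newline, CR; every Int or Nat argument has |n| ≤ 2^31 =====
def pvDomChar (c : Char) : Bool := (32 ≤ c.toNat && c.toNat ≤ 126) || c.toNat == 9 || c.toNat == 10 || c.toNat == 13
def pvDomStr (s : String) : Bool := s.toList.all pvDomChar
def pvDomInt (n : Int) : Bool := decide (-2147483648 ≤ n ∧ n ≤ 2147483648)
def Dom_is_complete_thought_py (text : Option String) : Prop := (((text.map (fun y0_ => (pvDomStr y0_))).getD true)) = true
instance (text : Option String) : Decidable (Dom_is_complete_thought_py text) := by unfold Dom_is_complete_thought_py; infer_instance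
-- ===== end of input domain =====

-- B replaces A's scan over 37 suffix tokens by a dispatch on the final character (ellipsis test
-- only in the '.' branch) followed by one backward scan that collects the last word and looks it
-- up in a set; same return value on every input (alternative objective, no speed claim).

-- ===== PORT A =====
def INCOMPLETE_ENDINGS : List String :=
  [",", ":", ";", "-", " and", " or", " but", " so", " because", " that", " which", " who",
   " where", " when", " while", " if", " then", " than", " the", " a", " an", " to", " of",
   " in", " on", " for", " with", " from", " by", " is", " are", " was", " were", " be",
   " it", " there", " this"]

def is_complete_thought_py (text : Option String) : Bool :=
  let cleaned := PySem.Str.strip (text.getD "")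
  if cleaned == "" then false
  else
    let lowr := PySem.Str.rstrip (PySem.Str.lower cleaned)
    if PySem.Str.endswith lowr "..." || PySem.Str.endswith lowr "," then false
    else if PySem.Str.endswith cleaned "." || PySem.Str.endswith cleaned "!" || PySem.Str.endswith cleaned "?" then true
    else !(INCOMPLETE_ENDINGS.any (fun tok => PySem.Str.endswith lowr tok))

-- ===== PORT B =====
-- the Python frozenset literal: its distinct elements (all 33 are distinct)
def INCOMPLETE_WORDS : List String :=
  ["and", "or", "but", "so", "because", "that", "which", "who", "where", "when", "while",
   "if", "then", "than", "the", "a", "an", "to", "of", "in", "on", "for", "with", "from",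
   "by", "is", "are", "was", "were", "be", "it", "there", "this"]

-- the 'for ch in reversed(lower)' loop of Source B: walk the reversed characters accumulating
-- `word`; at the first space decide by set membership of the collected word (reversed back),
-- if no space is ever met fall through to True
def scanLastWord : List Char → List Char → Bool
  | [], _ => true
  | c :: rest, word =>
    if c == ' ' then !(INCOMPLETE_WORDS.contains (String.ofList word.reverse))
    else scanLastWord rest (word ++ [c])

def is_complete_thought_py_alt (text : Option String) : Bool :=
  let cleaned := PySem.Str.strip (text.getD "")
  if cleaned == "" then false
  else
    let lowr := PySem.Str.rstrip (PySem.Str.lower cleaned)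
    -- lower[-1]: lowr is nonempty on every reachable input, so pyGet? is `some`; getD default never read
    let last := (PySem.Str.pyGet? lowr (-1)).getD ' '
    if last == '.' then !(PySem.Str.endswith lowr "...")
    else if last == '!' || last == '?' then true
    else if last == ',' || last == ':' || last == ';' || last == '-' then false
    else scanLastWord lowr.toList.reverse []

-- ===== PRECONDITION & SPEC =====
def Spec_is_complete_thought_py (text : Option String) (out : Bool) : Prop := out = is_complete_thought_py_alt text
instance (text : Option String) (out : Bool) : Decidable (Spec_is_complete_thought_py text out) := by unfold Spec_is_complete_thought_py; infer_instance

-- ===== CLAIM =====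
def Claim_equal_is_complete_thought_py : Prop := ∀ (text : Option String), Dom_is_complete_thought_py text → Spec_is_complete_thought_py text (is_complete_thought_py text)

-- ===== LEMMAS AND PROOFS =====

lemma takeWhile_all_append (p : Char → Bool) (xs ys : List Char) (h : ∀ c ∈ xs, p c = true) :
    (xs ++ ys).takeWhile p = xs ++ ys.takeWhile p := by
  induction xs with
  | nil => simp
  | cons a t ih =>
    simp only [List.cons_append, List.takeWhile_cons, h a (by simp)]
    rw [ih (fun c hc => h c (by simp [hc]))]; simp

lemma dropWhile_head_false (p : Char → Bool) (a : Char) (t : List Char) :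
    ∀ l : List Char, l.dropWhile p = a :: t → p a = false := by
  intro l
  induction l with
  | nil => intro h; simp at h
  | cons b l' ih =>
    intro h
    rw [List.dropWhile_cons] at h
    by_cases hb : p b = true
    · rw [if_pos hb] at h; exact ih h
    · rw [if_neg hb] at h
      cases h; simpa using hb

-- a one-character suffix test is a test on the last element
lemma endswith_single (l : List Char) (c : Char) :
    PySem.Chars.endswith l [c] = (l.getLast? == some c) := by
  rw [Bool.eq_iff_iff, PySem.Chars.endswith_iff, beq_iff_eq, ← List.reverse_prefix]
  cases h : l.reverse with
  | nil => simp [← l.head?_reverse, h]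
  | cons a t => simp [List.cons_prefix_iff, ← l.head?_reverse, h]

-- an "..." suffix forces the last character to be '.'
lemma endswith_ellipsis_last (l : List Char) (h : PySem.Chars.endswith l ['.', '.', '.'] = true) :
    l.getLast? = some '.' := by
  rw [PySem.Chars.endswith_iff] at h
  obtain ⟨t, rfl⟩ := h
  simp [List.getLast?_append]

-- a " word" suffix test is: there is a space, and the segment after the last space is the word
lemma endswith_space_word (l w : List Char) (hns : ' ' ∉ w) :
    PySem.Chars.endswith l (' ' :: w)
      = (decide (' ' ∈ l) && decide ((l.reverse.takeWhile (fun c => c ≠ ' ')).reverse = w)) := by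
  rw [Bool.eq_iff_iff, PySem.Chars.endswith_iff, ← List.reverse_prefix, List.reverse_cons]
  simp only [Bool.and_eq_true, decide_eq_true_eq]
  have hall : ∀ c ∈ w.reverse, (fun c => decide (c ≠ ' ')) c = true := by
    intro c hc; simp; rintro rfl; exact hns (List.mem_reverse.mp hc)
  constructor
  · rintro ⟨t, ht⟩
    constructor
    · rw [← List.mem_reverse, ← ht]; simp
    · rw [← ht, List.append_assoc, takeWhile_all_append _ _ _ hall]
      simp
  · rintro ⟨hmem, htw⟩
    have htw' : List.takeWhile (fun c => decide (c ≠ ' ')) l.reverse = w.reverse := by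
      rw [← htw]; simp
    cases hdw : List.dropWhile (fun c => decide (c ≠ ' ')) l.reverse with
    | nil =>
      exfalso
      have := List.takeWhile_append_dropWhile (p := fun c => decide (c ≠ ' ')) (l := l.reverse)
      rw [hdw, List.append_nil, htw'] at this
      rw [← List.mem_reverse, ← this, List.mem_reverse] at hmem
      exact hns hmem
    | cons a t =>
      have ha : a = ' ' := by
        have := dropWhile_head_false _ a t l.reverse hdw
        simpa using this
      refine ⟨t, ?_⟩
      have := List.takeWhile_append_dropWhile (p := fun c => decide (c ≠ ' ')) (l := l.reverse)
      rw [hdw, htw', ha] at this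
      rw [List.append_assoc, List.singleton_append]
      exact this

lemma pyGet_neg_one (l : List Char) : PySem.List.pyGet? l (-1) = l.getLast? := by
  simp [PySem.List.pyGet?, PySem.List.pyIdx?]
  cases l with
  | nil => simp
  | cons a t => simp [List.getLast?_eq_getElem?]

lemma ofList_eq_iff (l : List Char) (t : String) : (String.ofList l = t) ↔ l = t.toList := by
  constructor
  · rintro rfl; simp
  · rintro rfl; simp

-- arithmetic facts about uppercase characters and lowerChar
lemma upper_bounds (c : Char) (h : PySem.Chars.isupper c = true) : 65 ≤ c.toNat ∧ c.toNat ≤ 90 := by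
  simp only [PySem.Chars.isupper, Bool.and_eq_true, decide_eq_true_eq] at h
  obtain ⟨h1, h2⟩ := h
  rw [Char.le_def, UInt32.le_iff_toNat_le] at h1 h2
  exact ⟨h1, h2⟩

lemma toNat_ofNat_shift (c : Char) (h65 : 65 ≤ c.toNat) (h90 : c.toNat ≤ 90) :
    (Char.ofNat (c.toNat + 32)).toNat = c.toNat + 32 := by
  rw [Char.toNat_ofNat, if_pos]; exact Or.inl (by omega)

-- lowercasing does not create or destroy whitespace
lemma isspace_lowerChar (c : Char) :
    PySem.Chars.isspace (PySem.Chars.lowerChar c) = PySem.Chars.isspace c := by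
  simp only [PySem.Chars.lowerChar]
  split_ifs with h
  · obtain ⟨h65, h90⟩ := upper_bounds c h
    have ht := toNat_ofNat_shift c h65 h90
    simp only [PySem.Chars.isspace, ht]
    have e1 : ∀ b1 b2 : Bool, b1 = false → b2 = false → b1 = b2 := by intro b1 b2 x y; rw [x, y]
    apply e1 <;>
      · simp only [Bool.or_eq_false_iff, Bool.and_eq_false_iff, decide_eq_false_iff_not]
        omega
  · rfl

lemma dropWhile_idem (p : Char → Bool) (l : List Char) :
    (l.dropWhile p).dropWhile p = l.dropWhile p := by
  cases h : l.dropWhile p with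
  | nil => simp
  | cons a t =>
    rw [List.dropWhile_cons, dropWhile_head_false p a t l h]
    simp

-- rstrip is a no-op after lowercasing a stripped string
lemma rstrip_lower_strip (l : List Char) :
    PySem.Chars.rstrip (PySem.Chars.lower (PySem.Chars.strip l))
      = PySem.Chars.lower (PySem.Chars.strip l) := by
  simp only [PySem.Chars.strip, PySem.Chars.rstrip, PySem.Chars.lower, PySem.Chars.lstrip]
  rw [← List.map_reverse, List.dropWhile_map]
  have hp : (PySem.Chars.isspace ∘ PySem.Chars.lowerChar) = PySem.Chars.isspace := by
    funext c; exact isspace_lowerChar c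
  rw [hp]
  simp only [List.reverse_reverse]
  rw [dropWhile_idem]
  simp [List.map_reverse]

-- lowerChar fixes every character below 'A' and maps nothing new onto it
lemma lowerChar_eq_iff (c d : Char) (hd : d.toNat < 65) :
    (PySem.Chars.lowerChar c = d) ↔ c = d := by
  simp only [PySem.Chars.lowerChar]
  split_ifs with h
  · obtain ⟨h65, h90⟩ := upper_bounds c h
    have ht := toNat_ofNat_shift c h65 h90
    constructor
    · intro he
      exfalso
      have : (Char.ofNat (c.toNat + 32)).toNat = d.toNat := by rw [he]
      omega
    · intro he
      exfalso
      rw [he] at h65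
      omega
  · exact Iff.rfl

lemma some_beq_some (a b : Char) : ((some a == some b)) = (a == b) := by
  cases h : a == b <;> simp_all

lemma ofList_beq (l : List Char) (t : String) : (String.ofList l == t) = decide (l = t.toList) := by
  rw [Bool.eq_iff_iff, beq_iff_eq, decide_eq_true_eq]
  exact ofList_eq_iff l t

-- the backward scan of Source B, characterised: if the reversed text contains a space, look up
-- the (reversed back) prefix before the first space; otherwise True
lemma scanLastWord_eq (xs : List Char) : ∀ w : List Char,
    scanLastWord xs w
      = if ' ' ∈ xs
        then !(INCOMPLETE_WORDS.contains
                (String.ofList ((w ++ xs.takeWhile (fun c => decide (c ≠ ' '))).reverse)))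
        else true := by
  induction xs with
  | nil => intro w; simp [scanLastWord]
  | cons c rest ih =>
    intro w
    by_cases hc : c = ' '
    · subst hc
      simp [scanLastWord]
    · have hc' : (c == ' ') = false := by simp [hc]
      simp only [scanLastWord, hc', Bool.false_eq_true, if_false, ih]
      by_cases hsp : ' ' ∈ rest
      · have hsp2 : ' ' ∈ c :: rest := List.mem_cons_of_mem _ hsp
        simp only [hsp, hsp2, if_true, List.takeWhile_cons, hc, ne_eq,
          not_false_eq_true, decide_true]
        simp
      · have hsp2 : ' ' ∉ c :: rest := by
          intro h
          rcases List.mem_cons.mp h with h | h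
          · exact hc h.symm
          · exact hsp h
        simp [hsp, hsp2]

set_option maxHeartbeats 2000000 in
lemma ports_agree (text : Option String) :
    is_complete_thought_py text = is_complete_thought_py_alt text := by
  simp only [is_complete_thought_py, is_complete_thought_py_alt]
  set s := PySem.Str.strip (text.getD "") with hs
  by_cases h1 : s == ""
  · simp [h1]
  · simp only [h1, Bool.false_eq_true, if_false]
    have hne : s.toList ≠ [] := by
      intro h
      apply h1
      simp [String.toList_eq_nil_iff.mp h]
    obtain ⟨c, hc⟩ : ∃ c, s.toList.getLast? = some c := by
      cases h : s.toList.getLast? with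
      | none => exact absurd (List.getLast?_eq_none_iff.mp h) hne
      | some c => exact ⟨c, rfl⟩
    -- bring both sides to the Chars level
    simp only [PySem.Str.endswith_eq, PySem.Str.toList_rstrip, PySem.Str.toList_lower,
      PySem.Str.pyGet?_eq, PySem.Chars.pyGet?_eq_listPyGet?, String.reduceToList]
    set L := PySem.Chars.rstrip (PySem.Chars.lower s.toList) with hL
    have hmap : L = s.toList.map PySem.Chars.lowerChar := by
      rw [hL, hs, PySem.Str.toList_strip, rstrip_lower_strip]
      simp [PySem.Chars.lower]
    have hlastL : L.getLast? = some (PySem.Chars.lowerChar c) := by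
      rw [hmap, List.getLast?_map, hc, Option.map_some]
    rw [pyGet_neg_one, hlastL, Option.getD_some]
    rw [endswith_single L ',', endswith_single s.toList '.', endswith_single s.toList '!',
      endswith_single s.toList '?', hlastL, hc, some_beq_some, some_beq_some, some_beq_some,
      some_beq_some]
    -- the ellipsis test forces a final '.'
    have he3 : PySem.Chars.endswith L ['.', '.', '.'] = true → PySem.Chars.lowerChar c = '.' := by
      intro h
      have := endswith_ellipsis_last L h
      rw [hlastL] at this
      exact Option.some_injective _ this
    by_cases hm : PySem.Chars.lowerChar c = '.'
    · -- final character '.': both sides reduce to the ellipsis test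
      have hcd : c = '.' := (lowerChar_eq_iff c '.' (by decide)).mp hm
      have hk : (PySem.Chars.lowerChar c == ',') = false := by simp [hm]
      have hd : (PySem.Chars.lowerChar c == '.') = true := by simp [hm]
      have hcd' : (c == '.') = true := by simp [hcd]
      cases e3 : PySem.Chars.endswith L ['.', '.', '.'] <;>
        simp [hk, hd, hcd']
    · have e3 : PySem.Chars.endswith L ['.', '.', '.'] = false := by
        cases h : PySem.Chars.endswith L ['.', '.', '.'] with
        | false => rfl
        | true => exact absurd (he3 h) hm
      have hd : (PySem.Chars.lowerChar c == '.') = false := by simp [hm]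
      by_cases hb : PySem.Chars.lowerChar c = '!'
      · have hcb : c = '!' := (lowerChar_eq_iff c '!' (by decide)).mp hb
        have hk : (PySem.Chars.lowerChar c == ',') = false := by simp [hb]
        have horB : ((PySem.Chars.lowerChar c == '!') || (PySem.Chars.lowerChar c == '?')) = true := by
          simp [hb]
        have hor : ((c == '.') || (c == '!') || (c == '?')) = true := by simp [hcb]
        simp only [e3, hk, hd, hor, horB, Bool.or_false, Bool.false_or, Bool.false_eq_true,
          if_false, if_true]
      · by_cases hq : PySem.Chars.lowerChar c = '?'
        · have hcq : c = '?' := (lowerChar_eq_iff c '?' (by decide)).mp hq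
          have hk : (PySem.Chars.lowerChar c == ',') = false := by simp [hq]
          have horB : ((PySem.Chars.lowerChar c == '!') || (PySem.Chars.lowerChar c == '?')) = true := by
            simp [hq]
          have hor : ((c == '.') || (c == '!') || (c == '?')) = true := by simp [hcq]
          simp only [e3, hk, hd, hor, horB, Bool.or_false, Bool.false_or, Bool.false_eq_true,
            if_false, if_true]
        · -- final character is none of . ! ?
          have hcd : c ≠ '.' := fun h => hm (by rw [h]; decide)
          have hcb : c ≠ '!' := fun h => hb (by rw [h]; decide)
          have hcq : c ≠ '?' := fun h => hq (by rw [h]; decide)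
          have hdb : (c == '.') = false := by simp [hcd]
          have hbb : (c == '!') = false := by simp [hcb]
          have hqb : (c == '?') = false := by simp [hcq]
          have hbm : (PySem.Chars.lowerChar c == '!') = false := by simp [hb]
          have hqm : (PySem.Chars.lowerChar c == '?') = false := by simp [hq]
          by_cases hk : PySem.Chars.lowerChar c = ','
          · have hkb : (PySem.Chars.lowerChar c == ',') = true := by simp [hk]
            simp [e3, hkb, hd, hbm, hqm]
          · have hkb : (PySem.Chars.lowerChar c == ',') = false := by simp [hk]
            simp only [e3, hkb, Bool.or_false, Bool.false_or, Bool.false_eq_true, if_false,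
              hd, hbm, hqm, hdb, hbb, hqb]
            -- expand A's any over the 37 tokens and B's scan
            simp only [INCOMPLETE_ENDINGS, List.any_cons, List.any_nil, String.reduceToList]
            rw [endswith_single L ',', endswith_single L ':', endswith_single L ';',
              endswith_single L '-', hlastL, some_beq_some, some_beq_some, some_beq_some,
              some_beq_some, hkb]
            by_cases hcl : PySem.Chars.lowerChar c = ':'
            · have : (PySem.Chars.lowerChar c == ':') = true := by simp [hcl]
              simp [this]
            · by_cases hsc : PySem.Chars.lowerChar c = ';'
              · have : (PySem.Chars.lowerChar c == ';') = true := by simp [hsc]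
                have h2 : (PySem.Chars.lowerChar c == ':') = false := by simp [hcl]
                simp [this, h2]
              · by_cases hda : PySem.Chars.lowerChar c = '-'
                · have : (PySem.Chars.lowerChar c == '-') = true := by simp [hda]
                  have h2 : (PySem.Chars.lowerChar c == ':') = false := by simp [hcl]
                  have h3 : (PySem.Chars.lowerChar c == ';') = false := by simp [hsc]
                  simp [this, h2, h3]
                · have h2 : (PySem.Chars.lowerChar c == ':') = false := by simp [hcl]
                  have h3 : (PySem.Chars.lowerChar c == ';') = false := by simp [hsc]
                  have h4 : (PySem.Chars.lowerChar c == '-') = false := by simp [hda]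
                  simp only [h2, h3, h4, Bool.false_or, Bool.false_eq_true, if_false]
                  rw [scanLastWord_eq]
                  rw [endswith_space_word L ['a', 'n', 'd'] (by decide)]
                  rw [endswith_space_word L ['o', 'r'] (by decide)]
                  rw [endswith_space_word L ['b', 'u', 't'] (by decide)]
                  rw [endswith_space_word L ['s', 'o'] (by decide)]
                  rw [endswith_space_word L ['b', 'e', 'c', 'a', 'u', 's', 'e'] (by decide)]
                  rw [endswith_space_word L ['t', 'h', 'a', 't'] (by decide)]
                  rw [endswith_space_word L ['w', 'h', 'i', 'c', 'h'] (by decide)]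
                  rw [endswith_space_word L ['w', 'h', 'o'] (by decide)]
                  rw [endswith_space_word L ['w', 'h', 'e', 'r', 'e'] (by decide)]
                  rw [endswith_space_word L ['w', 'h', 'e', 'n'] (by decide)]
                  rw [endswith_space_word L ['w', 'h', 'i', 'l', 'e'] (by decide)]
                  rw [endswith_space_word L ['i', 'f'] (by decide)]
                  rw [endswith_space_word L ['t', 'h', 'e', 'n'] (by decide)]
                  rw [endswith_space_word L ['t', 'h', 'a', 'n'] (by decide)]
                  rw [endswith_space_word L ['t', 'h', 'e'] (by decide)]
                  rw [endswith_space_word L ['a'] (by decide)]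
                  rw [endswith_space_word L ['a', 'n'] (by decide)]
                  rw [endswith_space_word L ['t', 'o'] (by decide)]
                  rw [endswith_space_word L ['o', 'f'] (by decide)]
                  rw [endswith_space_word L ['i', 'n'] (by decide)]
                  rw [endswith_space_word L ['o', 'n'] (by decide)]
                  rw [endswith_space_word L ['f', 'o', 'r'] (by decide)]
                  rw [endswith_space_word L ['w', 'i', 't', 'h'] (by decide)]
                  rw [endswith_space_word L ['f', 'r', 'o', 'm'] (by decide)]
                  rw [endswith_space_word L ['b', 'y'] (by decide)]
                  rw [endswith_space_word L ['i', 's'] (by decide)]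
                  rw [endswith_space_word L ['a', 'r', 'e'] (by decide)]
                  rw [endswith_space_word L ['w', 'a', 's'] (by decide)]
                  rw [endswith_space_word L ['w', 'e', 'r', 'e'] (by decide)]
                  rw [endswith_space_word L ['b', 'e'] (by decide)]
                  rw [endswith_space_word L ['i', 't'] (by decide)]
                  rw [endswith_space_word L ['t', 'h', 'e', 'r', 'e'] (by decide)]
                  rw [endswith_space_word L ['t', 'h', 'i', 's'] (by decide)]
                  by_cases hsp : ' ' ∈ L.reverse
                  · have hsp' : (decide (' ' ∈ L)) = true :=
                      decide_eq_true (List.mem_reverse.mp hsp)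
                    rw [if_pos hsp]
                    simp only [hsp', Bool.true_and, List.nil_append, Bool.or_false,
                      INCOMPLETE_WORDS, List.contains_cons, List.contains_nil, ofList_beq,
                      String.reduceToList]
                    rfl
                  · have hsp' : (decide (' ' ∈ L)) = false :=
                      decide_eq_false (fun h => hsp (List.mem_reverse.mpr h))
                    rw [if_neg hsp]
                    simp only [hsp', Bool.false_and, Bool.or_false, Bool.not_false]

-- ===== VERDICT =====
theorem is_complete_thought_py_spec : Claim_equal_is_complete_thought_py := by
  intro text _
  exact ports_agree text
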